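-- pv_equiv track=rewrite | github.com/vavronet/python-for-beginners | functions/examples/example_9.py | show_placeholders
-- ===== SOURCE A (Python) =====
-- def show_placeholders(word, letter, guessed_letters):
--     word_capitals = word.upper()
--     letter_capital = letter.upper()
--     placeholders = ''
--     for x in word_capitals:
--         if x == letter_capital:
--             placeholders = placeholders + x + ' '
--             guessed_letters.append(letter_capital)
--         elif (x in guessed_letters) == True:
--              placeholders = placeholders + x + ' '
--         else:
--             placeholders = placeholders + '_ '
--     return placeholders
-- ===== SOURCE B (Python) =====
-- # Two-pass rewrite: lift the guessed_letters mutation out of the build loop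
-- # (extend once by the match count), then build the output as a joined comprehension.
-- def show_placeholders(word, letter, guessed_letters):
--     word_capitals = word.upper()
--     letter_capital = letter.upper()
--     matches = sum(1 for c in word_capitals if c == letter_capital)
--     guessed_letters.extend([letter_capital] * matches)
--     return ''.join(
--         c + ' ' if c == letter_capital or c in guessed_letters else '_ '
--         for c in word_capitals
--     )
-- ===== Notes on version B (the rewrite author's own statement) =====
-- stated objective: simpler
-- what changed: The interleaved single pass that mutates guessed_letters while building the string is split into a count-then-extend step followed by a separate joined comprehension with the three branches collapsed into two.
import Mathlib
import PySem

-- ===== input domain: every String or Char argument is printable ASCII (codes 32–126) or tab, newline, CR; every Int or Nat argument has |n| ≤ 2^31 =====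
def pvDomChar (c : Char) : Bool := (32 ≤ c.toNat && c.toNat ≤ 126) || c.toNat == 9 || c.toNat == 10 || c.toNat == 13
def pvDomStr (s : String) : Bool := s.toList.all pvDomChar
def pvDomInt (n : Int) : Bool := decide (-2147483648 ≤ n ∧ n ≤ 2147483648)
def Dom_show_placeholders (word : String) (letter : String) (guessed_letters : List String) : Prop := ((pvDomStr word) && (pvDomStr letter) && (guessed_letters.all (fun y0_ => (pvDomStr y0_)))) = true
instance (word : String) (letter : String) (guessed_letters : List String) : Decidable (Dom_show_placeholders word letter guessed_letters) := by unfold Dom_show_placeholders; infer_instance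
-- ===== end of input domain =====

-- B lifts the guessed_letters mutation out of the build loop (count then extend) and builds the
-- output in a second joined pass; both Pythons mutate guessed_letters identically, the equivalence
-- proved here is about the RETURN value.

-- ===== PORT A =====
-- A: single fold carrying (placeholders, guessed_letters) through the word, branching per char.
def show_placeholders (word : String) (letter : String) (guessed_letters : List String) : String :=
  let word_capitals := (PySem.Str.upper word).toList
  let letter_capital := PySem.Str.upper letter
  let st := word_capitals.foldl
    (fun (st : List Char × List String) x =>
      if String.ofList [x] = letter_capital then
        (st.1 ++ [x, ' '], st.2 ++ [letter_capital])
      else if String.ofList [x] ∈ st.2 then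
        (st.1 ++ [x, ' '], st.2)
      else
        (st.1 ++ ['_', ' '], st.2))
    ([], guessed_letters)
  String.ofList st.1

-- ===== PORT B =====
-- B: count the nMatch matching chars, extend the guessed list once, then join a per-char map.
def show_placeholders_alt (word : String) (letter : String) (guessed_letters : List String) : String :=
  let word_capitals := (PySem.Str.upper word).toList
  let letter_capital := PySem.Str.upper letter
  let nMatch := word_capitals.countP (fun c => String.ofList [c] = letter_capital)
  let gl := guessed_letters ++ List.replicate nMatch letter_capital
  String.ofList (PySem.Chars.join []
    (word_capitals.map (fun c =>
      if String.ofList [c] = letter_capital ∨ String.ofList [c] ∈ gl then [c, ' '] else ['_', ' '])))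

-- ===== PRECONDITION & SPEC =====
def Spec_show_placeholders (word : String) (letter : String) (guessed_letters : List String) (out : String) : Prop := out = show_placeholders_alt word letter guessed_letters
instance (word : String) (letter : String) (guessed_letters : List String) (out : String) : Decidable (Spec_show_placeholders word letter guessed_letters out) := by unfold Spec_show_placeholders; infer_instance

-- ===== CLAIM (what is proved, stated in full; the proofs are below) =====
def Claim_equal_show_placeholders : Prop := ∀ (word : String) (letter : String) (guessed_letters : List String), Dom_show_placeholders word letter guessed_letters → Spec_show_placeholders word letter guessed_letters (show_placeholders word letter guessed_letters)

-- ===== LEMMAS AND PROOFS =====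

-- membership in gl ++ replicate k lc collapses to membership in gl for a string ≠ lc
lemma mem_append_replicate {s lc : String} {gl : List String} {k : Nat} (h : s ≠ lc) :
    s ∈ gl ++ List.replicate k lc ↔ s ∈ gl := by
  simp [List.mem_append, List.mem_replicate, h]

-- A's fold, started with any extension of gl by copies of lc, appends the canonical per-char pieces
lemma foldA_char (lc : String) (gl : List String) :
    ∀ (cs : List Char) (acc : List Char) (k : Nat),
      (cs.foldl
        (fun (st : List Char × List String) x =>
          if String.ofList [x] = lc then (st.1 ++ [x, ' '], st.2 ++ [lc])
          else if String.ofList [x] ∈ st.2 then (st.1 ++ [x, ' '], st.2)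
          else (st.1 ++ ['_', ' '], st.2))
        (acc, gl ++ List.replicate k lc)).1
      = acc ++ cs.flatMap (fun c =>
          if String.ofList [c] = lc ∨ String.ofList [c] ∈ gl then [c, ' '] else ['_', ' ']) := by
  intro cs
  induction cs with
  | nil => intro acc k; simp
  | cons c cs ih =>
    intro acc k
    rw [List.foldl_cons]
    by_cases hc : String.ofList [c] = lc
    · have h2 : (gl ++ List.replicate k lc) ++ [lc] = gl ++ List.replicate (k + 1) lc := by
        simp [List.replicate_succ']
      simp only [if_pos hc, h2]
      rw [ih (acc ++ [c, ' ']) (k + 1)]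
      simp [hc]
    · by_cases hm : String.ofList [c] ∈ gl
      · have hm' : String.ofList [c] ∈ gl ++ List.replicate k lc := List.mem_append_left _ hm
        simp only [if_neg hc, if_pos hm']
        rw [ih (acc ++ [c, ' ']) k]
        simp [hc, hm]
      · have hm' : String.ofList [c] ∉ gl ++ List.replicate k lc := by
          rw [mem_append_replicate hc]; exact hm
        simp only [if_neg hc, if_neg hm']
        rw [ih (acc ++ ['_', ' ']) k]
        simp [hc, hm]

-- join with the empty separator is flatten
lemma join_nil_eq_flatten (ps : List (List Char)) :
    PySem.Chars.join [] ps = ps.flatten := by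
  simp only [PySem.Chars.join, List.intercalate]
  induction ps with
  | nil => simp
  | cons p ps ih =>
    cases ps with
    | nil => simp
    | cons q qs => simp_all [List.intersperse]

-- ===== VERDICT (by name: the statement is the Claim_ definition above) =====
theorem show_placeholders_spec : Claim_equal_show_placeholders := by
  intro word letter guessed_letters _
  unfold Spec_show_placeholders show_placeholders show_placeholders_alt
  dsimp only
  generalize (PySem.Str.upper word).toList = wc
  generalize PySem.Str.upper letter = lc
  have hA := foldA_char lc guessed_letters wc [] 0
  simp only [List.replicate_zero, List.append_nil] at hA
  rw [hA, join_nil_eq_flatten, ← List.flatMap_def, List.nil_append]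
  refine congrArg String.ofList (congrArg (List.flatMap · wc) (funext fun c => ?_))
  by_cases hc : String.ofList [c] = lc
  · simp [hc]
  · simp [hc, mem_append_replicate hc]
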